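-- pv_equiv track=rewrite | github.com/kum-kum1234/ACC45DAYSOFCODE-2024 | day_8_question_2_PSEUDOSORT.py | is_pseudo_sorted
-- ===== SOURCE A (Python) =====
-- def is_pseudo_sorted(arr, n):
--     def is_sorted(arr):
--         return all(arr[i] <= arr[i + 1] for i in range(len(arr) - 1))
--
--     if is_sorted(arr):
--         return "YES"
--
--     for i in range(n - 1):
--         if arr[i] > arr[i + 1]:
--             arr[i], arr[i + 1] = arr[i + 1], arr[i]
--             if is_sorted(arr):
--                 return "YES"
--             arr[i], arr[i + 1] = arr[i + 1], arr[i]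
--             break
--
--     return "NO"
-- ===== SOURCE B (Python) =====
-- def is_pseudo_sorted(arr, n):
--     # Return-value equivalent to A; unlike A, never mutates arr.
--     m = len(arr)
--     inv = [i for i in range(m - 1) if arr[i] > arr[i + 1]]
--     if not inv:
--         return "YES"
--     j = inv[0]
--     if len(inv) == 1 and j < n - 1 \
--        and (j == 0 or arr[j - 1] <= arr[j + 1]) \
--        and (j + 2 >= m or arr[j] <= arr[j + 2]):
--         return "YES"
--     return "NO"
-- ===== Notes on version B (the rewrite author's own statement) =====
-- stated objective: alternative
-- what changed: Instead of swapping in place and re-scanning the whole array, B collects the inversion indices in one pass and decides by a closed condition: exactly one inversion, it lies below n-1, and the two boundary comparisons around the swapped pair hold; B never mutates arr (A leaves arr swapped when the swap path answers YES).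
import Mathlib
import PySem

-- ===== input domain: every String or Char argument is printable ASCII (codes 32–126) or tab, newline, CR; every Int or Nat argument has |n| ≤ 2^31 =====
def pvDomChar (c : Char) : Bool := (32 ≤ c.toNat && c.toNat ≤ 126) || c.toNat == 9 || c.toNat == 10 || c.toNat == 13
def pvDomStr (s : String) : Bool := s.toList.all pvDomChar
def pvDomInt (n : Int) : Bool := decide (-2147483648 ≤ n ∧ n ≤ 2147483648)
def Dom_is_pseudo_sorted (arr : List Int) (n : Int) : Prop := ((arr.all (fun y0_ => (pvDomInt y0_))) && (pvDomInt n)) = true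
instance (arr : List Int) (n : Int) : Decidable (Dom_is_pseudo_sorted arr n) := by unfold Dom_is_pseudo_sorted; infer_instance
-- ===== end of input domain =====

-- B replaces A's swap-and-rescan with a one-pass inversion list plus a closed boundary test (alternative
-- decomposition, no mutation). Equivalence is about the RETURN value only: A mutates arr (it leaves arr
-- swapped when the swap path answers "YES"); B never mutates its argument.

-- ===== PORT A =====
-- is_sorted helper: all(arr[i] <= arr[i+1] for i in range(len(arr)-1)); indices are always in range,
-- so pyGetD (default 0, never used out of range here) computes exactly Python's arr[i].
def isSortedA (l : List Int) : Bool :=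
  (PySem.List.pyRange 0 ((l.length : Int) - 1) 1).all
    (fun i => decide (PySem.List.pyGetD l i 0 ≤ PySem.List.pyGetD l (i + 1) 0))

-- the for-loop over range(n-1) with its break: on the first inversion it tests the swapped array and stops.
-- (Python evaluates arr[i], arr[i+1] only at reached indices; after the initial sorted-check those are
-- always in range, so pyGetD is exact and A is total.)
def loopA (arr : List Int) : List Int → String
  | [] => "NO"
  | i :: rest =>
    if PySem.List.pyGetD arr (i + 1) 0 < PySem.List.pyGetD arr i 0 then
      if isSortedA ((arr.set i.toNat (PySem.List.pyGetD arr (i + 1) 0)).set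
          (i + 1).toNat (PySem.List.pyGetD arr i 0)) then "YES" else "NO"
    else loopA arr rest

def is_pseudo_sorted (arr : List Int) (n : Int) : String :=
  if isSortedA arr then "YES"
  else loopA arr (PySem.List.pyRange 0 (n - 1) 1)

-- ===== PORT B =====
-- inv = [i for i in range(m-1) if arr[i] > arr[i+1]]  (indices always in range; pyGetD exact)
def invListB (arr : List Int) : List Int :=
  (PySem.List.pyRange 0 ((arr.length : Int) - 1) 1).filter
    (fun i => decide (PySem.List.pyGetD arr (i + 1) 0 < PySem.List.pyGetD arr i 0))

def is_pseudo_sorted_alt (arr : List Int) (n : Int) : String :=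
  match invListB arr with
  | [] => "YES"
  | j :: rest =>
    if rest.isEmpty
        && decide (j < n - 1)
        && (decide (j = 0) || decide (PySem.List.pyGetD arr (j - 1) 0 ≤ PySem.List.pyGetD arr (j + 1) 0))
        && (decide ((arr.length : Int) ≤ j + 2) || decide (PySem.List.pyGetD arr j 0 ≤ PySem.List.pyGetD arr (j + 2) 0))
    then "YES" else "NO"

-- ===== PRECONDITION & SPEC =====
def Spec_is_pseudo_sorted (arr : List Int) (n : Int) (out : String) : Prop := out = is_pseudo_sorted_alt arr n
instance (arr : List Int) (n : Int) (out : String) : Decidable (Spec_is_pseudo_sorted arr n out) := by unfold Spec_is_pseudo_sorted; infer_instance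

-- ===== CLAIM (what is proved, stated in full; the proofs are below) =====
def Claim_equal_is_pseudo_sorted : Prop := ∀ (arr : List Int) (n : Int), Dom_is_pseudo_sorted arr n → Spec_is_pseudo_sorted arr n (is_pseudo_sorted arr n)

-- ===== LEMMAS AND PROOFS =====

lemma range0 (t : Int) :
    PySem.List.pyRange 0 t 1 = (List.range t.toNat).map (fun k : ℕ => (k : Int)) := by
  rw [PySem.List.pyRange_one, show t - 0 = t by ring]
  exact List.map_congr_left (fun k _ => by omega)

lemma pyGetD_cast (arr : List Int) (k : ℕ) :
    PySem.List.pyGetD arr (k : Int) 0 = arr.getD k 0 := PySem.List.pyGetD_natCast arr k 0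

lemma pyGetD_cast_succ (arr : List Int) (k : ℕ) :
    PySem.List.pyGetD arr ((k : Int) + 1) 0 = arr.getD (k + 1) 0 := by
  rw [show ((k : Int) + 1) = ((k + 1 : ℕ) : Int) by push_cast; ring]
  exact PySem.List.pyGetD_natCast arr (k + 1) 0

lemma pyGetD_cast_two (arr : List Int) (k : ℕ) :
    PySem.List.pyGetD arr ((k : Int) + 2) 0 = arr.getD (k + 2) 0 := by
  rw [show ((k : Int) + 2) = ((k + 2 : ℕ) : Int) by push_cast; ring]
  exact PySem.List.pyGetD_natCast arr (k + 2) 0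

lemma sortedA_iff (l : List Int) :
    isSortedA l = true ↔ ∀ k : ℕ, k + 1 < l.length → l.getD k 0 ≤ l.getD (k + 1) 0 := by
  unfold isSortedA
  rw [range0, List.all_eq_true]
  constructor
  · intro h k hk
    have hm : (k : Int) ∈ (List.range ((l.length : Int) - 1).toNat).map (fun k : ℕ => (k : Int)) :=
      List.mem_map_of_mem (List.mem_range.mpr (by omega))
    have := h _ hm
    rwa [pyGetD_cast, pyGetD_cast_succ, decide_eq_true_eq] at this
  · intro h x hx
    obtain ⟨k, hk, rfl⟩ := List.mem_map.mp hx
    rw [pyGetD_cast, pyGetD_cast_succ, decide_eq_true_eq]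
    exact h k (by simp at hk; omega)

lemma invListB_eq (arr : List Int) :
    invListB arr = ((List.range (arr.length - 1)).filter
      (fun k => decide (arr.getD (k + 1) 0 < arr.getD k 0))).map (fun k : ℕ => (k : Int)) := by
  unfold invListB
  rw [range0, List.filter_map,
    show ((arr.length : Int) - 1).toNat = arr.length - 1 by omega]
  have hp : ∀ k ∈ List.range (arr.length - 1),
      ((fun i => decide (PySem.List.pyGetD arr (i + 1) 0 < PySem.List.pyGetD arr i 0)) ∘
        (fun k : ℕ => (k : Int))) k
      = decide (arr.getD (k + 1) 0 < arr.getD k 0) := by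
    intro k _
    simp [Function.comp, pyGetD_cast_succ]
  rw [List.filter_congr hp]

lemma filter_nil_iff (arr : List Int) :
    (List.range (arr.length - 1)).filter
      (fun k => decide (arr.getD (k + 1) 0 < arr.getD k 0)) = [] ↔
    ∀ k : ℕ, k + 1 < arr.length → arr.getD k 0 ≤ arr.getD (k + 1) 0 := by
  simp only [List.filter_eq_nil_iff, List.mem_range, decide_eq_true_eq]
  constructor
  · intro h k hk; have := h k (by omega); omega
  · intro h k hk; have := h k (by omega); omega

lemma find_range (p : ℕ → Bool) (t jn : ℕ) (hj : p jn = true)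
    (hmin : ∀ k, k < jn → p k = false) :
    List.find? p (List.range t) = if jn < t then some jn else none := by
  induction t with
  | zero => simp
  | succ t ih =>
    rw [List.range_succ, List.find?_append, ih]
    by_cases h1 : jn < t
    · have h2 : jn < t + 1 := by omega
      simp [h1, h2]
    · by_cases h2 : jn = t
      · subst h2
        simp [hj]
      · have h3 : p t = false := hmin t (by omega)
        have h4 : ¬ jn < t + 1 := by omega
        simp [h1, h4, h3]

lemma loopA_find (arr : List Int) (l : List Int) :
    loopA arr l =
      match List.find? (fun i => decide (PySem.List.pyGetD arr (i + 1) 0 < PySem.List.pyGetD arr i 0)) l with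
      | none => "NO"
      | some i =>
        if isSortedA ((arr.set i.toNat (PySem.List.pyGetD arr (i + 1) 0)).set
            (i + 1).toNat (PySem.List.pyGetD arr i 0)) then "YES" else "NO" := by
  induction l with
  | nil => simp [loopA]
  | cons i rest ih =>
    rw [loopA, List.find?]
    by_cases h : PySem.List.pyGetD arr (i + 1) 0 < PySem.List.pyGetD arr i 0
    · simp [h]
    · simp [h, ih]

lemma set_getD (arr : List Int) (jn : ℕ) (hlt : jn + 1 < arr.length) (b a : Int) (k : ℕ) :
    ((arr.set jn b).set (jn + 1) a).getD k 0 =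
      if k = jn then b else if k = jn + 1 then a else arr.getD k 0 := by
  simp only [List.getD_eq_getElem?_getD, List.getElem?_set, List.length_set]
  split_ifs <;> first | rfl | omega

lemma swap_sorted_iff (arr : List Int) (jn : ℕ) (hlt : jn + 1 < arr.length)
    (hQ : arr.getD (jn + 1) 0 < arr.getD jn 0)
    (hmin : ∀ k, k < jn → arr.getD k 0 ≤ arr.getD (k + 1) 0) :
    (∀ k : ℕ, k + 1 < arr.length →
        ((arr.set jn (arr.getD (jn + 1) 0)).set (jn + 1) (arr.getD jn 0)).getD k 0 ≤
        ((arr.set jn (arr.getD (jn + 1) 0)).set (jn + 1) (arr.getD jn 0)).getD (k + 1) 0)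
    ↔ ((∀ k : ℕ, k + 1 < arr.length → arr.getD (k + 1) 0 < arr.getD k 0 → k = jn)
       ∧ (jn = 0 ∨ arr.getD (jn - 1) 0 ≤ arr.getD (jn + 1) 0)
       ∧ (arr.length ≤ jn + 2 ∨ arr.getD jn 0 ≤ arr.getD (jn + 2) 0)) := by
  constructor
  · intro hs
    have hb2 : arr.length ≤ jn + 2 ∨ arr.getD jn 0 ≤ arr.getD (jn + 2) 0 := by
      by_cases h : arr.length ≤ jn + 2
      · exact Or.inl h
      · right
        have this1 := hs (jn + 1) (by omega)
        rw [show jn + 1 + 1 = jn + 2 from rfl,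
          set_getD arr jn hlt _ _ (jn + 1), set_getD arr jn hlt _ _ (jn + 2)] at this1
        split_ifs at this1 <;> omega
    refine ⟨?_, ?_, hb2⟩
    · intro k hk hQk
      by_contra hne
      rcases lt_or_gt_of_ne hne with h | h
      · exact absurd (hmin k h) (by omega)
      · by_cases hk1 : k = jn + 1
        · subst hk1
          rw [show jn + 1 + 1 = jn + 2 from rfl] at hQk
          rcases hb2 with h2 | h2 <;> omega
        · have this1 := hs k hk
          rw [set_getD arr jn hlt _ _ k, set_getD arr jn hlt _ _ (k + 1)] at this1
          split_ifs at this1 <;> omega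
    · by_cases h0 : jn = 0
      · exact Or.inl h0
      · right
        have this1 := hs (jn - 1) (by omega)
        rw [show jn - 1 + 1 = jn from by omega,
          set_getD arr jn hlt _ _ (jn - 1), set_getD arr jn hlt _ _ jn] at this1
        split_ifs at this1 <;> omega
  · rintro ⟨huniq, hb1, hb2⟩ k hk
    rw [set_getD arr jn hlt _ _ k, set_getD arr jn hlt _ _ (k + 1)]
    by_cases h1 : k = jn
    · subst h1
      split_ifs <;> omega
    · by_cases h2 : k + 1 = jn
      · rcases hb1 with h0 | hb
        · omega
        · rw [show jn - 1 = k from by omega] at hb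
          split_ifs <;> omega
      · by_cases h3 : k = jn + 1
        · subst h3
          rw [show jn + 1 + 1 = jn + 2 from rfl]
          rcases hb2 with h2' | hb
          · omega
          · split_ifs <;> omega
        · have hk2 : arr.getD k 0 ≤ arr.getD (k + 1) 0 := by
            by_cases hQk : arr.getD (k + 1) 0 < arr.getD k 0
            · exact absurd (huniq k hk hQk) h1
            · omega
          split_ifs <;> omega

lemma filter_head_facts (arr : List Int) (jn : ℕ) (restn : List ℕ)
    (hF : (List.range (arr.length - 1)).filter
      (fun k => decide (arr.getD (k + 1) 0 < arr.getD k 0)) = jn :: restn) :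
    jn + 1 < arr.length ∧ arr.getD (jn + 1) 0 < arr.getD jn 0 ∧
    (∀ k, k < jn → arr.getD k 0 ≤ arr.getD (k + 1) 0) ∧
    (restn = [] ↔ ∀ k : ℕ, k + 1 < arr.length → arr.getD (k + 1) 0 < arr.getD k 0 → k = jn) := by
  have hpw : (jn :: restn).Pairwise (· < ·) := by
    rw [← hF]; exact (List.pairwise_lt_range).filter _
  have hmemF : ∀ k : ℕ, k ∈ jn :: restn ↔ (k < arr.length - 1 ∧ arr.getD (k + 1) 0 < arr.getD k 0) := by
    intro k
    rw [← hF]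
    simp [List.mem_filter, List.mem_range]
  have hj := (hmemF jn).mp (by simp)
  refine ⟨by omega, hj.2, ?_, ?_⟩
  · intro k hk
    by_contra h
    have hkF : k ∈ jn :: restn := (hmemF k).mpr ⟨by omega, by omega⟩
    rcases List.mem_cons.mp hkF with rfl | hkr
    · omega
    · have := (List.pairwise_cons.mp hpw).1 k hkr
      omega
  · constructor
    · intro hr k hk hQk
      have : k ∈ jn :: restn := (hmemF k).mpr ⟨by omega, hQk⟩
      rw [hr] at this
      simpa using this
    · intro h
      cases restn with
      | nil => rfl
      | cons x xs =>
        have hx : x ∈ jn :: x :: xs := by simp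
        have := (hmemF x).mp hx
        have hxeq := h x (by omega) this.2
        have := (List.pairwise_cons.mp hpw).1 x (by simp)
        omega

lemma main_eq (arr : List Int) (n : Int) :
    is_pseudo_sorted arr n = is_pseudo_sorted_alt arr n := by
  unfold is_pseudo_sorted is_pseudo_sorted_alt
  rw [invListB_eq]
  cases hF : (List.range (arr.length - 1)).filter
      (fun k => decide (arr.getD (k + 1) 0 < arr.getD k 0)) with
  | nil =>
    have hs : isSortedA arr = true := (sortedA_iff arr).mpr ((filter_nil_iff arr).mp hF)
    rw [hs]
    simp
  | cons jn restn =>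
    obtain ⟨hlt, hQ, hmin, hrest⟩ := filter_head_facts arr jn restn hF
    have hns : isSortedA arr = false := by
      rw [Bool.eq_false_iff]
      intro h
      have := (sortedA_iff arr).mp h (jn) (by omega)
      omega
    rw [hns, if_neg (by simp)]
    rw [range0, loopA_find, List.find?_map]
    have hfr := find_range (fun k => decide (arr.getD (k + 1) 0 < arr.getD k 0)) (n - 1).toNat jn
      (by simpa using hQ)
      (by intro k hk; simpa using hmin k hk)
    have hcomp : ((fun i => decide (PySem.List.pyGetD arr (i + 1) 0 < PySem.List.pyGetD arr i 0)) ∘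
        (fun k : ℕ => (k : Int))) = fun k : ℕ => decide (arr.getD (k + 1) 0 < arr.getD k 0) := by
      funext k
      simp [Function.comp, pyGetD_cast_succ]
    rw [hcomp, hfr]
    by_cases hjn : jn < (n - 1).toNat
    · rw [if_pos hjn]
      simp only [Option.map_some]
      have e1 : PySem.List.pyGetD arr ((jn : Int) + 1) 0 = arr.getD (jn + 1) 0 :=
        pyGetD_cast_succ arr jn
      have e2 : PySem.List.pyGetD arr (jn : Int) 0 = arr.getD jn 0 :=
        pyGetD_cast arr jn
      have e3 : ((jn : Int)).toNat = jn := by omega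
      have e4 : ((jn : Int) + 1).toNat = jn + 1 := by omega
      rw [e1, e2, e3, e4]
      -- both sides are if-then-else on equal conditions
      have hswl : ((arr.set jn (arr.getD (jn + 1) 0)).set (jn + 1) (arr.getD jn 0)).length = arr.length := by
        simp
      have hcond : isSortedA ((arr.set jn (arr.getD (jn + 1) 0)).set (jn + 1) (arr.getD jn 0)) =
          ((restn.map (fun k : ℕ => (k : Int))).isEmpty
            && decide ((jn : Int) < n - 1)
            && (decide ((jn : Int) = 0) || decide (PySem.List.pyGetD arr ((jn : Int) - 1) 0 ≤ PySem.List.pyGetD arr ((jn : Int) + 1) 0))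
            && (decide ((arr.length : Int) ≤ (jn : Int) + 2) || decide (PySem.List.pyGetD arr (jn : Int) 0 ≤ PySem.List.pyGetD arr ((jn : Int) + 2) 0))) := by
        rw [Bool.eq_iff_iff, sortedA_iff]
        simp only [hswl]
        rw [swap_sorted_iff arr jn hlt hQ hmin]
        simp only [Bool.and_eq_true, Bool.or_eq_true, decide_eq_true_eq,
          List.isEmpty_iff, List.map_eq_nil_iff, ← hrest, e1, e2,
          pyGetD_cast_two, Nat.cast_eq_zero]
        constructor
        · rintro ⟨hu, hb1, hb2⟩
          refine ⟨⟨⟨hu, by omega⟩, ?_⟩, ?_⟩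
          · rcases hb1 with h0 | hb
            · exact Or.inl h0
            · by_cases h0 : jn = 0
              · exact Or.inl h0
              · right
                rw [show ((jn : Int) - 1) = ((jn - 1 : ℕ) : Int) from by omega,
                  PySem.List.pyGetD_natCast]
                exact hb
          · rcases hb2 with h2 | h2
            · left; omega
            · exact Or.inr h2
        · rintro ⟨⟨⟨hu, _⟩, hb1⟩, hb2⟩
          refine ⟨hu, ?_, ?_⟩
          · rcases hb1 with h0 | hb
            · exact Or.inl h0
            · by_cases h0 : jn = 0
              · exact Or.inl h0
              · right
                rw [show ((jn : Int) - 1) = ((jn - 1 : ℕ) : Int) from by omega,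
                  PySem.List.pyGetD_natCast] at hb
                exact hb
          · rcases hb2 with h2 | h2
            · left; omega
            · exact Or.inr h2
      rw [hcond]
      simp only [List.map_cons]
    · rw [if_neg hjn]
      have : decide ((jn : Int) < n - 1) = false := by
        simp only [decide_eq_false_iff_not]; omega
      simp [this]

-- ===== VERDICT (by name: the statement is the Claim_ definition above) =====
theorem is_pseudo_sorted_spec : Claim_equal_is_pseudo_sorted := by
  intro arr n _
  exact main_eq arr n
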